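-- pv_equiv track=rewrite | github.com/liskos/zadanie25osipov | variant_05/22.py | f
-- ===== SOURCE A (Python) =====
-- def f(x):
--     a, b = 0, 1
--     while x > 0:
--         a += 1
--         if x % 14 != 0:
--             b = b * (x % 14)
--         x = x // 14
--     return a, b
-- ===== SOURCE B (Python) =====
-- def f(x):
--     if x <= 0:
--         return 0, 1
--     a, b = f(x // 14)
--     d = x % 14
--     return a + 1, b * d if d != 0 else b
-- ===== Notes on version B (the rewrite author's own statement) =====
-- stated objective: alternative
-- what changed: B replaces A's iterative while-loop with two mutable accumulators by a direct structural recursion on the quotient: the base case returns (0, 1) and each call combines the recursive result with the current digit, so no loop state exists.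
import Mathlib
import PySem

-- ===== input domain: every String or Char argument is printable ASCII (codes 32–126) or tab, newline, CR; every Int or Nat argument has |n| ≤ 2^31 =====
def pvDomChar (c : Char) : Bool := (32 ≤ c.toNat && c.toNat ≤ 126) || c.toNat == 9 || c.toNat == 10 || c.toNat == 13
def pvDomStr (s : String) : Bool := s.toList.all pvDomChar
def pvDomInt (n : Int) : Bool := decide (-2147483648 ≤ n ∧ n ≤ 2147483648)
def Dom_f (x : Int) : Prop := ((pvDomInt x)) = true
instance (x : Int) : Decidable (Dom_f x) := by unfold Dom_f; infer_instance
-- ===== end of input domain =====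

-- B replaces A's accumulator loop by a direct structural recursion on the quotient (alternative decomposition, same cost).

-- used by both ports' decreasing_by: the loop/recursion variable strictly shrinks
lemma pvFloordivLt {x : Int} (h : 0 < x) :
    (PySem.Int.floordiv x 14).toNat < x.toNat := by
  rw [PySem.Int.floordiv_eq_ediv_of_pos (by norm_num : (0:Int) < 14)]
  have h1 := Int.mul_ediv_add_emod x 14
  have h2 := Int.emod_nonneg x (by norm_num : (14:Int) ≠ 0)
  have h3 := Int.emod_lt_of_pos x (by norm_num : (0:Int) < 14)
  omega

-- ===== PORT A =====
-- the while loop of A, carrying the counter a and the product b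
def fLoop (x a b : Int) : Int × Int :=
  if h : 0 < x then
    fLoop (PySem.Int.floordiv x 14) (a + 1)
      (if PySem.Int.mod x 14 ≠ 0 then b * PySem.Int.mod x 14 else b)
  else (a, b)
termination_by x.toNat
decreasing_by
  exact pvFloordivLt h

def f (x : Int) : Int × Int := fLoop x 0 1

-- ===== PORT B =====
-- if x <= 0: return 0, 1; else recurse on x // 14 and combine with the digit x % 14
def f_alt (x : Int) : Int × Int :=
  if h : 0 < x then
    let p := f_alt (PySem.Int.floordiv x 14)
    let d := PySem.Int.mod x 14
    (p.1 + 1, if d ≠ 0 then p.2 * d else p.2)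
  else (0, 1)
termination_by x.toNat
decreasing_by
  exact pvFloordivLt h

-- ===== PRECONDITION & SPEC =====
def Spec_f (x : Int) (out : Int × Int) : Prop := out = f_alt x
instance (x : Int) (out : Int × Int) : Decidable (Spec_f x out) := by unfold Spec_f; infer_instance

-- ===== CLAIM (what is proved, stated in full; the proofs are below) =====
def Claim_equal_f : Prop := ∀ (x : Int), Dom_f x → Spec_f x (f x)

-- ===== LEMMAS AND PROOFS =====

-- loop invariant: the accumulators a, b factor out of the loop's result
lemma fLoop_eq (n : Nat) : ∀ (x a b : Int), x.toNat = n →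
    fLoop x a b = (a + (f_alt x).1, b * (f_alt x).2) := by
  induction n using Nat.strong_induction_on with
  | _ n ih =>
    intro x a b hn
    rw [fLoop, f_alt]
    by_cases h : 0 < x
    · simp only [h, dif_pos]
      have hlt := pvFloordivLt h
      have hrec := ih (PySem.Int.floordiv x 14).toNat (by omega) (PySem.Int.floordiv x 14)
        (a + 1) (if PySem.Int.mod x 14 ≠ 0 then b * PySem.Int.mod x 14 else b) rfl
      rw [hrec, Prod.mk.injEq]
      constructor
      · ring
      · split_ifs with hm
        · ring
        · ring
    · simp [h]

-- ===== VERDICT (by name: the statement is the Claim_ definition above) =====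
theorem f_spec : Claim_equal_f := by
  intro x _
  unfold Spec_f f
  simpa using fLoop_eq x.toNat x 0 1 rfl
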